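-- pv_equiv track=rewrite | github.com/Arifuzzaman-Munaf/KC_assessment | BAD_URLS.py | remove_extra_slash
-- ===== SOURCE A (Python) =====
-- def remove_extra_slash(url):
--     """
--     valid_url is the validated url without extra slashes
--     flag is used for tracking the presence of extra slash
--     """
--     valid_url = ""
--     flag = False
--     for i in url:
--         if flag and i == '/':
--             continue
--         elif i == '/':
--             flag = True
--             valid_url += i
--         else:
--             valid_url += i
--             flag = False
--
--     return valid_url
-- ===== SOURCE B (Python) =====
-- def remove_extra_slash(url):
--     # Run-based recursion: copy the text before the first slash, emit a single '/',
--     # skip the whole slash run with lstrip, and recurse on the remainder.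
--     k = url.find('/')
--     if k == -1:
--         return url
--     return url[:k] + '/' + remove_extra_slash(url[k + 1:].lstrip('/'))
-- ===== Notes on version B (the rewrite author's own statement) =====
-- stated objective: faster
-- what changed: Replaced A's character-by-character flag-state accumulator loop with a run-based recursion: find the first slash, copy the preceding text, emit one slash, strip the whole slash run and recurse on the rest.
import Mathlib
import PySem

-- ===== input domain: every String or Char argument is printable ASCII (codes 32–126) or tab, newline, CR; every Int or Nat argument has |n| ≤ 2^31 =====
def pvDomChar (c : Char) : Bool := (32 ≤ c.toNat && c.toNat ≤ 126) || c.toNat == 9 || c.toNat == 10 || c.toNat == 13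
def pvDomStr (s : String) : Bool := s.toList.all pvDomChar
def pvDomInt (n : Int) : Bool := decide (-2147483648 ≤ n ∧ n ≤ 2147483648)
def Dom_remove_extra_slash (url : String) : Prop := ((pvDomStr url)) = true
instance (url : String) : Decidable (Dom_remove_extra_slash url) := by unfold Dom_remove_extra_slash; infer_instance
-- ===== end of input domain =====

-- B replaces A's char-by-char flag-state loop with a run-based recursion (find the first
-- slash, copy the prefix, emit one '/', strip the slash run, recurse); same output, O(n).


-- ===== PORT A =====
-- the loop body of A: state (valid_url, flag), one step per character (string kept as List Char)
def remove_extra_slash_step (st : List Char × Bool) (c : Char) : List Char × Bool :=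
  if st.2 ∧ c = '/' then st
  else if c = '/' then (st.1 ++ [c], true)
  else (st.1 ++ [c], false)

def remove_extra_slash (url : String) : String :=
  String.ofList (url.toList.foldl remove_extra_slash_step ([], false)).1

-- ===== PORT B =====
-- Source B's recursion on List Char: url.find('/') ported as takeWhile (≠'/') (= url[:k]) and
-- dropWhile (≠'/') (= url[k:]; empty iff find returns -1); lstrip('/') is dropWhile (= '/').
def remove_extra_slash_alt_go (cs : List Char) : List Char :=
  let pre := cs.takeWhile (· ≠ '/')
  match h : cs.dropWhile (· ≠ '/') with
  | [] => cs
  | _ :: t => pre ++ '/' :: remove_extra_slash_alt_go (t.dropWhile (· = '/'))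
termination_by cs.length
decreasing_by
  have h1 : (cs.dropWhile (· ≠ '/')).length ≤ cs.length := List.length_dropWhile_le _ _
  have h2 : (t.dropWhile (· = '/')).length ≤ t.length := List.length_dropWhile_le _ _
  rw [h] at h1
  simp only [List.length_cons] at h1
  omega

def remove_extra_slash_alt (url : String) : String :=
  String.ofList (remove_extra_slash_alt_go url.toList)

-- ===== PRECONDITION & SPEC =====
def Spec_remove_extra_slash (url : String) (out : String) : Prop := out = remove_extra_slash_alt url
instance (url : String) (out : String) : Decidable (Spec_remove_extra_slash url out) := by unfold Spec_remove_extra_slash; infer_instance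

-- ===== CLAIM (what is proved, stated in full; the proofs are below) =====
def Claim_equal_remove_extra_slash : Prop := ∀ (url : String), Dom_remove_extra_slash url → Spec_remove_extra_slash url (remove_extra_slash url)

-- ===== LEMMAS AND PROOFS =====

-- abstract "keep" function: what A's loop emits from flag b onward
def reKeep (b : Bool) : List Char → List Char
  | [] => []
  | c :: t => if b ∧ c = '/' then reKeep (c = '/') t else c :: reKeep (c = '/') t

theorem foldl_step_eq_keep (cs : List Char) (a : List Char) (b : Bool) :
    (cs.foldl remove_extra_slash_step (a, b)).1 = a ++ reKeep b cs := by
  induction cs generalizing a b with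
  | nil => simp [reKeep]
  | cons c t ih =>
    simp only [List.foldl_cons, remove_extra_slash_step, reKeep]
    by_cases hb : b = true <;> by_cases hc : c = '/' <;>
      simp [hb, hc, ih, List.append_assoc]

theorem keep_false_prefix (l rest : List Char) (h : ∀ c ∈ l, c ≠ '/') :
    reKeep false (l ++ rest) = l ++ reKeep false rest := by
  induction l with
  | nil => simp
  | cons c t ih =>
    have hc : c ≠ '/' := h c (by simp)
    simp [reKeep, hc, ih (fun x hx => h x (by simp [hx]))]

theorem keep_true_dropWhile (l : List Char) :
    reKeep true l = reKeep false (l.dropWhile (· = '/')) := by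
  induction l with
  | nil => simp [reKeep]
  | cons c t ih =>
    by_cases hc : c = '/'
    · simp [reKeep, hc, ih]
    · simp [hc, reKeep]

theorem go_eq_nil (cs : List Char) (h : cs.dropWhile (· ≠ '/') = []) :
    remove_extra_slash_alt_go cs = cs := by
  rw [remove_extra_slash_alt_go.eq_def]
  split
  · rfl
  · next c t heq => rw [h] at heq; cases heq

theorem go_eq_cons (cs : List Char) (c : Char) (t : List Char)
    (h : cs.dropWhile (· ≠ '/') = c :: t) :
    remove_extra_slash_alt_go cs =
      cs.takeWhile (· ≠ '/') ++ '/' :: remove_extra_slash_alt_go (t.dropWhile (· = '/')) := by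
  rw [remove_extra_slash_alt_go.eq_def]
  split
  · next heq => rw [h] at heq; cases heq
  · next c' t' heq =>
    rw [h] at heq
    cases heq
    rfl

theorem keep_false_takeWhile (cs rest : List Char) :
    reKeep false (cs.takeWhile (· ≠ '/') ++ rest) =
      cs.takeWhile (· ≠ '/') ++ reKeep false rest :=
  keep_false_prefix _ _ (fun x hx => by simpa using List.mem_takeWhile_imp hx)

theorem go_eq_keep (cs : List Char) : remove_extra_slash_alt_go cs = reKeep false cs := by
  induction cs using remove_extra_slash_alt_go.induct with
  | case1 cs h =>
    have hsplit : cs.takeWhile (· ≠ '/') ++ cs.dropWhile (· ≠ '/') = cs :=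
      List.takeWhile_append_dropWhile
    rw [h, List.append_nil] at hsplit
    rw [go_eq_nil cs h]
    conv_rhs => rw [← hsplit]
    rw [show cs.takeWhile (· ≠ '/') = cs.takeWhile (· ≠ '/') ++ [] by simp,
      keep_false_takeWhile]
    simpa [reKeep] using hsplit.symm
  | case2 cs c t h ih =>
    have hsplit : cs.takeWhile (· ≠ '/') ++ cs.dropWhile (· ≠ '/') = cs :=
      List.takeWhile_append_dropWhile
    rw [h] at hsplit
    have hc : c = '/' := by
      have hne : cs.dropWhile (fun x => decide (x ≠ '/')) ≠ [] := by rw [h]; simp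
      have h2 := List.head_dropWhile_not (fun x => decide (x ≠ '/')) hne
      simp only [h, List.head_cons] at h2
      simpa using h2
    rw [go_eq_cons cs c t h]
    conv_rhs => rw [← hsplit]
    rw [keep_false_takeWhile]
    simp [reKeep, hc, keep_true_dropWhile, ih]

-- ===== VERDICT (by name: the statement is the Claim_ definition above) =====
theorem remove_extra_slash_spec : Claim_equal_remove_extra_slash := by
  intro url _
  unfold Spec_remove_extra_slash remove_extra_slash remove_extra_slash_alt
  rw [foldl_step_eq_keep, go_eq_keep]
  simp
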